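-- pv_equiv track=rewrite | github.com/go13209/algorithm | 프로그래머스/lv0/120835. 진료 순서 정하기/진료 순서 정하기.py | solution
-- ===== SOURCE A (Python) =====
-- def solution(emergency):
--     answer = []
--     dict = {}
--     for num in range(1, len(emergency)+1):
--         dict[sorted(emergency, reverse=True)[num-1]] = num
--     for e in emergency:
--         answer.append(dict[e])
--     return answer
-- ===== SOURCE B (Python) =====
-- def solution(emergency):
--     n = len(emergency)
--     order = sorted(range(n), key=lambda i: emergency[i])
--     answer = [0] * n
--     prev = None
--     rank = 0
--     for pos, i in enumerate(order):
--         v = emergency[i]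
--         if v != prev:
--             rank = n - pos
--             prev = v
--         answer[i] = rank
--     return answer
-- ===== Notes on version B (the rewrite author's own statement) =====
-- stated objective: faster
-- what changed: B replaces A's per-rank re-sort and value->rank dict with one argsort of the indices followed by a single sweep that writes each rank into a preallocated answer array at the original position, carrying the rank across runs of equal values.
import Mathlib
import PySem

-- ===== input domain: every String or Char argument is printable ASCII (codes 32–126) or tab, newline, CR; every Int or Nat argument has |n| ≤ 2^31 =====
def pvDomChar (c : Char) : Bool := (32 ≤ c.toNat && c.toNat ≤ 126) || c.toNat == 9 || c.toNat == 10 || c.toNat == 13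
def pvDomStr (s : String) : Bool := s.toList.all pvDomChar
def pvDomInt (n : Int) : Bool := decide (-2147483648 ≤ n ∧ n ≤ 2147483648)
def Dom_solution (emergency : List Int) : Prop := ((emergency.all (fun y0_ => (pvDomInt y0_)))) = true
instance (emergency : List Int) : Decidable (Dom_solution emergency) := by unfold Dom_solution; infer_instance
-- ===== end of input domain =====

-- B replaces the per-rank re-sort + rank dict with one argsort and a single sweep writing ranks by original index (faster).

-- ===== PORT A =====
-- dict[sorted(...)[num-1]]: the index num-1 is always in range (1 ≤ num ≤ len), so pyGetD is exact here;
-- dict[e]: every e is a key (e occurs in sorted(emergency)), so getD is exact here.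
def solution (emergency : List Int) : List Int :=
  let dict := (PySem.List.pyRange 1 ((emergency.length : Int) + 1) 1).foldl
    (fun d num => d.insert (PySem.List.pyGetD (PySem.List.sorted emergency id true) (num - 1) 0) num)
    PySem.Dict.empty
  emergency.foldl (fun answer e => answer ++ [dict.getD e 0]) []

-- ===== PORT B =====
-- answer[i] = rank / v = emergency[i]: i comes from sorted(range(n)), always in range, so pySetD/pyGetD are exact here.
-- The loop body of Source B (state = (answer, prev, rank), p = (pos, i)):
def solutionAltStep (emergency : List Int) (n : Nat) (st : List Int × Option Int × Int)
    (p : Int × Int) : List Int × Option Int × Int :=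
  let v := PySem.List.pyGetD emergency p.2 0
  let rank := if some v ≠ st.2.1 then (n : Int) - p.1 else st.2.2
  let prev := if some v ≠ st.2.1 then some v else st.2.1
  (PySem.List.pySetD st.1 p.2 rank, prev, rank)

def solution_alt (emergency : List Int) : List Int :=
  let n := emergency.length
  let order := PySem.List.sorted (PySem.List.pyRange 0 (n : Int) 1)
    (fun i => PySem.List.pyGetD emergency i 0) false
  let st := (PySem.List.enumerate order 0).foldl (solutionAltStep emergency n)
    (List.replicate n 0, none, 0)
  st.1

-- ===== PRECONDITION & SPEC =====
def Spec_solution (emergency : List Int) (out : List Int) : Prop := out = solution_alt emergency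
instance (emergency : List Int) (out : List Int) : Decidable (Spec_solution emergency out) := by unfold Spec_solution; infer_instance

-- ===== CLAIM (what is proved, stated in full; the proofs are below) =====
def Claim_equal_solution : Prop := ∀ (emergency : List Int), Dom_solution emergency → Spec_solution emergency (solution emergency)

-- ===== LEMMAS AND PROOFS =====

-- rank of e = number of elements ≥ e (as an Int); both programs compute emergency.map (cnt emergency).
def cnt (emergency : List Int) (e : Int) : Int :=
  (emergency.countP (fun x => decide (e ≤ x)) : Int)

theorem enum_nil (s : Int) : PySem.List.enumerate ([] : List Int) s = [] := by
  simp [PySem.List.enumerate]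

theorem enum_cons (i : Int) (t : List Int) (s : Int) :
    PySem.List.enumerate (i :: t) s = (s, i) :: PySem.List.enumerate t (s + 1) := by
  simp [PySem.List.enumerate]

-- in a key-nondecreasing list, every key is ≤ the key of the last element
theorem key_le_getLast (key : Int → Int) : ∀ (l : List Int) (lst : Int),
    l.Pairwise (fun a b => key a ≤ key b) → l.getLast? = some lst →
    ∀ a ∈ l, key a ≤ key lst := by
  intro l
  induction l with
  | nil => intro lst _ hl; simp at hl
  | cons x t ih =>
    intro lst hp hl a ha
    cases t with
    | nil =>
      simp at hl ha
      subst hl; subst ha; exact le_refl _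
    | cons y t' =>
      have hl' : (y :: t').getLast? = some lst := by
        simpa [List.getLast?_cons_cons] using hl
      rcases List.mem_cons.mp ha with rfl | ha'
      · exact (List.pairwise_cons.mp hp).1 lst (List.mem_of_getLast? hl')
      · exact ih lst (List.pairwise_cons.mp hp).2 hl' a ha'

-- counting split: |xs| = #(x < v) + #(v ≤ x)
theorem countP_lt_add_countP_le (l : List Int) (v : Int) :
    l.countP (fun x => decide (x < v)) + l.countP (fun x => decide (v ≤ x)) = l.length := by
  induction l with
  | nil => simp
  | cons x t ih =>
    by_cases h : x < v
    · simp [h, not_le.mpr h]; omega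
    · simp [h, not_lt.mp h]; omega

-- the rank written at the first position of a value: n - (#positions before) = #elements ≥ that value
theorem rank_formula (emergency : List Int) (done rest' : List Int) (i : Int)
    (hp : (done ++ i :: rest').Pairwise
      (fun a b => PySem.List.pyGetD emergency a 0 ≤ PySem.List.pyGetD emergency b 0))
    (hperm : (done ++ i :: rest').Perm (PySem.List.pyRange 0 (emergency.length : Int) 1))
    (hlast : ∀ lst, done.getLast? = some lst →
      PySem.List.pyGetD emergency lst 0 ≠ PySem.List.pyGetD emergency i 0) :
    (emergency.length : Int) - done.length
      = cnt emergency (PySem.List.pyGetD emergency i 0) := by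
  obtain ⟨hpd, hpi, hcross⟩ := List.pairwise_append.mp hp
  -- every element of done has key < key i
  have hdone_lt : ∀ a ∈ done,
      PySem.List.pyGetD emergency a 0 < PySem.List.pyGetD emergency i 0 := by
    intro a ha
    cases hdone : done.getLast? with
    | none => rw [List.getLast?_eq_none_iff] at hdone; subst hdone; simp at ha
    | some lst =>
      have h1 := key_le_getLast (fun j => PySem.List.pyGetD emergency j 0) done lst hpd hdone a ha
      have h2 := hcross lst (List.mem_of_getLast? hdone) i (by simp)
      have h3 := hlast lst hdone
      simp only at h1 h2
      omega
  have hdone_cnt : done.countP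
      (fun j => decide (PySem.List.pyGetD emergency j 0 < PySem.List.pyGetD emergency i 0))
      = done.length :=
    List.countP_eq_length.mpr (by intro a ha; simpa using hdone_lt a ha)
  have hrest_cnt : (i :: rest').countP
      (fun j => decide (PySem.List.pyGetD emergency j 0 < PySem.List.pyGetD emergency i 0)) = 0 := by
    rw [List.countP_eq_zero]
    intro a ha
    rcases List.mem_cons.mp ha with rfl | ha'
    · simp
    · have := (List.pairwise_cons.mp hpi).1 a ha'
      simp only at this ⊢
      simp
      omega
  -- transport the count to emergency through the map over the range and the permutation
  have hmap : List.map (fun j => PySem.List.pyGetD emergency j 0)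
      (PySem.List.pyRange 0 (emergency.length : Int) 1) = emergency :=
    PySem.List.map_pyGetD_pyRange_zero' ..
  have hlt : emergency.countP
      (fun x => decide (x < PySem.List.pyGetD emergency i 0)) = done.length := by
    generalize hv : PySem.List.pyGetD emergency i 0 = v at hdone_cnt hrest_cnt ⊢
    conv_lhs => rw [← hmap]
    rw [List.countP_map, ← hperm.countP_eq]
    rw [List.countP_append]
    rw [show ((fun x => decide (x < v)) ∘ fun j => PySem.List.pyGetD emergency j 0)
        = (fun j => decide (PySem.List.pyGetD emergency j 0 < v)) from rfl]
    rw [hdone_cnt, hrest_cnt]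
    omega
  have hsplit := countP_lt_add_countP_le emergency (PySem.List.pyGetD emergency i 0)
  unfold cnt
  omega

-- invariant of Source B's sweep: positions already processed hold their final rank, the rest hold 0
theorem bfold_aux (emergency : List Int) :
    ∀ (rest done ans : List Int) (prev : Option Int) (rank : Int),
    (done ++ rest).Pairwise
      (fun a b => PySem.List.pyGetD emergency a 0 ≤ PySem.List.pyGetD emergency b 0) →
    (done ++ rest).Perm (PySem.List.pyRange 0 (emergency.length : Int) 1) →
    ans.length = emergency.length →
    (∀ j : Nat, j < emergency.length →
      ans.getD j 0 = if (j : Int) ∈ done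
        then cnt emergency (PySem.List.pyGetD emergency (j : Int) 0) else 0) →
    prev = done.getLast?.map (fun i => PySem.List.pyGetD emergency i 0) →
    (∀ i, done.getLast? = some i → rank = cnt emergency (PySem.List.pyGetD emergency i 0)) →
    (((PySem.List.enumerate rest (done.length : Int)).foldl
        (solutionAltStep emergency emergency.length) (ans, prev, rank)).1.length
        = emergency.length ∧
     ∀ j : Nat, j < emergency.length →
      ((PySem.List.enumerate rest (done.length : Int)).foldl
        (solutionAltStep emergency emergency.length) (ans, prev, rank)).1.getD j 0
        = if (j : Int) ∈ done ++ rest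
          then cnt emergency (PySem.List.pyGetD emergency (j : Int) 0) else 0) := by
  intro rest
  induction rest with
  | nil =>
    intro done ans prev rank hp hperm hlen hans hprev hrank
    rw [enum_nil, List.foldl_nil]
    exact ⟨hlen, by simpa using hans⟩
  | cons i rest' ih =>
    intro done ans prev rank hp hperm hlen hans hprev hrank
    have hi_mem : i ∈ PySem.List.pyRange 0 (emergency.length : Int) 1 :=
      hperm.mem_iff.mp (by simp)
    have hi_bounds := PySem.List.mem_pyRange_one.mp hi_mem
    rw [enum_cons, List.foldl_cons]
    -- the rank written at this step is cnt of the current value, in both branches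
    have hrank' : (if some (PySem.List.pyGetD emergency i 0) ≠ prev
        then (emergency.length : Int) - (done.length : Int) else rank)
        = cnt emergency (PySem.List.pyGetD emergency i 0) := by
      by_cases hne : some (PySem.List.pyGetD emergency i 0) ≠ prev
      · rw [if_pos hne]
        apply rank_formula emergency done rest' i hp hperm
        intro lst hlst hkey
        apply hne
        rw [hprev, hlst]
        simp [hkey]
      · rw [if_neg hne]
        rw [not_ne_iff] at hne
        rw [hprev] at hne
        cases hdone : done.getLast? with
        | none => rw [hdone] at hne; simp at hne
        | some lst =>
          rw [hdone] at hne
          simp only [Option.map_some, Option.some.injEq] at hne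
          rw [hrank lst hdone, hne]
    -- the new prev is the current value in both branches
    have hprev' : (if some (PySem.List.pyGetD emergency i 0) ≠ prev
        then some (PySem.List.pyGetD emergency i 0) else prev)
        = some (PySem.List.pyGetD emergency i 0) := by
      by_cases hne : some (PySem.List.pyGetD emergency i 0) ≠ prev
      · rw [if_pos hne]
      · rw [if_neg hne]; rw [not_ne_iff] at hne; exact hne.symm
    have hstep : solutionAltStep emergency emergency.length (ans, prev, rank)
        ((done.length : Int), i)
        = (ans.set i.toNat (cnt emergency (PySem.List.pyGetD emergency i 0)),
           some (PySem.List.pyGetD emergency i 0),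
           cnt emergency (PySem.List.pyGetD emergency i 0)) := by
      simp only [solutionAltStep]
      rw [PySem.List.pySetD_of_nonneg ans _ hi_bounds.1]
      rw [hrank', hprev']
    rw [hstep]
    have hcast : (done.length : Int) + 1 = (((done ++ [i]).length : Nat) : Int) := by
      simp
    rw [hcast]
    have happ : (done ++ [i]) ++ rest' = done ++ i :: rest' := by simp
    have ihc := ih (done ++ [i])
      (ans.set i.toNat (cnt emergency (PySem.List.pyGetD emergency i 0)))
      (some (PySem.List.pyGetD emergency i 0))
      (cnt emergency (PySem.List.pyGetD emergency i 0))
      (by rw [happ]; exact hp)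
      (by rw [happ]; exact hperm)
      (by simpa using hlen)
      (by
        intro j hj
        have hjlen : j < (ans.set i.toNat
            (cnt emergency (PySem.List.pyGetD emergency i 0))).length := by
          simpa [hlen] using hj
        rw [List.getD_eq_getElem _ 0 hjlen, List.getElem_set]
        by_cases hji : i.toNat = j
        · have hjid : (j : Int) = i := by omega
          rw [if_pos hji, if_pos (by simp [hjid]), hjid]
        · have hjid : (j : Int) ≠ i := by omega
          rw [if_neg hji, ← List.getD_eq_getElem ans 0 (by omega), hans j hj]
          have : ((j : Int) ∈ done ++ [i]) ↔ ((j : Int) ∈ done) := by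
            simp [List.mem_append, hjid]
          rw [if_congr this rfl rfl])
      (by simp)
      (by
        intro i' hi'
        rw [List.getLast?_concat] at hi'
        simp only [Option.some.injEq] at hi'
        rw [hi'])
    rw [happ] at ihc
    exact ihc


-- ---- A side ----

-- A's rank-building fold reduces to a fold over List.range.
theorem dictA_eq_range (s : List Int) (n : Nat) (hn : s.length = n) :
    (PySem.List.pyRange 1 ((n : Int) + 1) 1).foldl
      (fun d num => d.insert (PySem.List.pyGetD s (num - 1) 0) num) PySem.Dict.empty
    = (List.range n).foldl
      (fun d k => d.insert (PySem.List.pyGetD s (k : Int) 0) ((k : Int) + 1)) PySem.Dict.empty := by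
  rw [PySem.List.pyRange_one, List.foldl_map]
  have h1 : ((n : Int) + 1 - 1).toNat = n := by omega
  rw [h1]
  apply PySem.List.foldl_congr_mem
  intro d k _
  simp
  ring_nf

-- invariant for A's dict fold over the first n indices of a descending list s
theorem dictA_getD_aux (s : List Int) (hs : s.Pairwise (fun a b => b ≤ a)) (e : Int) :
    ∀ n, n ≤ s.length →
    ((List.range n).foldl
      (fun d k => d.insert (PySem.List.pyGetD s (k : Int) 0) ((k : Int) + 1)) PySem.Dict.empty).getD e 0
    = if e ∈ s.take n then ((s.take n).countP (fun x => decide (e ≤ x)) : Int) else 0 := by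
  intro n
  induction n with
  | zero => intro _; simp
  | succ m ih =>
    intro hn
    have hm : m < s.length := by omega
    rw [List.range_succ, List.foldl_append]
    simp only [List.foldl_cons, List.foldl_nil]
    rw [PySem.Dict.getD_insert]
    have hget : PySem.List.pyGetD s (m : Int) 0 = s[m] := by simp [hm]
    have htake : s.take (m + 1) = s.take m ++ [s[m]] := by
      rw [List.take_add_one]
      simp [List.getElem?_eq_getElem hm]
    have hpw := (List.pairwise_iff_getElem).mp hs
    by_cases hek : e = s[m]
    · have hall : ∀ x ∈ s.take (m + 1), decide (e ≤ x) = true := by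
        intro x hx
        rw [List.mem_take_iff_getElem] at hx
        obtain ⟨i, hi, rfl⟩ := hx
        rcases Nat.lt_or_ge i m with h | h
        · have := hpw i m (by omega) hm h
          simp only [decide_eq_true_eq]
          omega
        · have : i = m := by omega
          subst this; simp [hek]
      have hcnt : (s.take (m + 1)).countP (fun x => decide (e ≤ x)) = (s.take (m + 1)).length :=
        List.countP_eq_length.mpr hall
      have hmem : e ∈ s.take (m + 1) := by
        refine List.mem_take_iff_getElem.mpr ⟨m, ?_, hek.symm⟩
        omega
      rw [if_pos (by rw [hget]; exact hek), if_pos hmem, hcnt,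
        List.length_take_of_le (by omega)]
      push_cast; ring
    · rw [if_neg (by rw [hget]; exact hek), ih (by omega)]
      have hmemiff : e ∈ s.take (m + 1) ↔ e ∈ s.take m ∨ e = s[m] := by
        rw [htake, List.mem_append, List.mem_singleton]
      by_cases hmem : e ∈ s.take m
      · have hlt : s[m] < e := by
          rw [List.mem_take_iff_getElem] at hmem
          obtain ⟨i, hi, rfl⟩ := hmem
          have hle : s[m] ≤ s[i] := hpw i m (by omega) hm (by omega)
          rcases lt_or_eq_of_le hle with h | h
          · exact h
          · exact (hek h.symm).elim
        rw [if_pos hmem, if_pos (hmemiff.mpr (Or.inl hmem)), htake]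
        rw [List.countP_append]
        simp [not_le.mpr hlt]
      · rw [if_neg hmem, if_neg (by rw [hmemiff]; tauto)]

-- the overwritten rank of e in A's dict is the count of elements ≥ e, for descending s
theorem dictA_getD (s : List Int) (hs : s.Pairwise (fun a b => b ≤ a)) (e : Int) (he : e ∈ s) :
    ((List.range s.length).foldl
      (fun d k => d.insert (PySem.List.pyGetD s (k : Int) 0) ((k : Int) + 1)) PySem.Dict.empty).getD e 0
    = cnt s e := by
  have := dictA_getD_aux s hs e s.length (le_refl _)
  rw [List.take_length] at this
  rw [this, if_pos he, cnt]

-- ---- A side assembly ----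

theorem solution_eq_map_cnt (emergency : List Int) :
    solution emergency = emergency.map (cnt emergency) := by
  simp only [solution]
  rw [dictA_eq_range _ _ (PySem.List.length_sorted emergency id true),
      PySem.List.foldl_append_singleton_eq_map]
  apply List.map_congr_left
  intro e he
  have hs : (PySem.List.sorted emergency id true).Pairwise (fun a b => b ≤ a) := by
    have := PySem.List.sorted_pairwise_rev (xs := emergency) (key := id)
    simpa using this
  have hmem : e ∈ PySem.List.sorted emergency id true := by
    rw [PySem.List.mem_sorted]; exact he
  rw [← PySem.List.length_sorted emergency id true, dictA_getD _ hs e hmem]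
  unfold cnt
  rw [(PySem.List.sorted_perm emergency id true).countP_eq]

-- ---- B side assembly ----

theorem solution_alt_eq_map_cnt (emergency : List Int) :
    solution_alt emergency = emergency.map (cnt emergency) := by
  simp only [solution_alt]
  have horder := PySem.List.sorted_perm (PySem.List.pyRange 0 (emergency.length : Int) 1)
    (fun i => PySem.List.pyGetD emergency i 0) false
  obtain ⟨hL, hG⟩ := bfold_aux emergency
    (PySem.List.sorted (PySem.List.pyRange 0 (emergency.length : Int) 1)
      (fun i => PySem.List.pyGetD emergency i 0) false)
    [] (List.replicate emergency.length 0) none 0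
    (by simpa using PySem.List.sorted_pairwise
          (xs := PySem.List.pyRange 0 (emergency.length : Int) 1)
          (key := fun i => PySem.List.pyGetD emergency i 0))
    (by simpa using horder)
    (by simp)
    (by intro j hj; simp)
    (by simp)
    (by intro i hi; simp at hi)
  simp only [List.nil_append, List.length_nil, Nat.cast_zero] at hL hG
  apply List.ext_getElem
  · rw [hL]; simp
  · intro j h1 h2
    have hj : j < emergency.length := by rw [← hL]; exact h1
    have hmem : ((j : Int) ∈ PySem.List.sorted
        (PySem.List.pyRange 0 (emergency.length : Int) 1)
        (fun i => PySem.List.pyGetD emergency i 0) false) := by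
      rw [horder.mem_iff, PySem.List.mem_pyRange_one]
      constructor
      · exact Int.natCast_nonneg j
      · exact_mod_cast hj
    have := hG j hj
    rw [if_pos hmem] at this
    rw [← List.getD_eq_getElem _ 0 h1, this]
    simp [cnt, List.getElem?_eq_getElem hj]

-- ===== VERDICT (by name: the statement is the Claim_ definition above) =====
theorem solution_spec : Claim_equal_solution := by
  intro emergency _
  unfold Spec_solution
  rw [solution_eq_map_cnt, solution_alt_eq_map_cnt]
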